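-- pv_equiv track=rewrite | github.com/ethierlab/Decoder-Processing | Hybrid_decoder_Final.py | _valid_window_indices
-- ===== SOURCE A (Python) =====
-- def _valid_window_indices(n_time, k, cuts):
--     if not cuts:
--         return range(k, n_time)
--     idx = []
--     for t in range(k, n_time):             # fenêtre = [t-k, t)
--         # invalide si ∃c dans (t-k, t)
--         if any(t - k < c < t for c in cuts):
--             continue
--         idx.append(t)
--     return idx
-- ===== SOURCE B (Python) =====
-- def _valid_window_indices(n_time, k, cuts):
--     if not cuts:
--         return range(k, n_time)
--     if n_time <= k:
--         return []
--     s = sorted(cuts)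
--
--     def first_greater(x):
--         # index of the first element of s strictly greater than x (bisect_right)
--         lo, hi = 0, len(s)
--         while lo < hi:
--             mid = (lo + hi) // 2
--             if s[mid] <= x:
--                 lo = mid + 1
--             else:
--                 hi = mid
--         return lo
--
--     idx = []
--     for t in range(k, n_time):
--         j = first_greater(t - k)        # first cut > t - k
--         if j == len(s) or s[j] >= t:    # no cut in (t-k, t)
--             idx.append(t)
--     return idx
-- ===== Notes on version B (the rewrite author's own statement) =====
-- stated objective: alternative
-- what changed: B sorts the cuts once and, for each window end t, locates the first cut greater than t-k by a hand-written binary search, replacing A's linear any-scan over all cuts for every t.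
import Mathlib
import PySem

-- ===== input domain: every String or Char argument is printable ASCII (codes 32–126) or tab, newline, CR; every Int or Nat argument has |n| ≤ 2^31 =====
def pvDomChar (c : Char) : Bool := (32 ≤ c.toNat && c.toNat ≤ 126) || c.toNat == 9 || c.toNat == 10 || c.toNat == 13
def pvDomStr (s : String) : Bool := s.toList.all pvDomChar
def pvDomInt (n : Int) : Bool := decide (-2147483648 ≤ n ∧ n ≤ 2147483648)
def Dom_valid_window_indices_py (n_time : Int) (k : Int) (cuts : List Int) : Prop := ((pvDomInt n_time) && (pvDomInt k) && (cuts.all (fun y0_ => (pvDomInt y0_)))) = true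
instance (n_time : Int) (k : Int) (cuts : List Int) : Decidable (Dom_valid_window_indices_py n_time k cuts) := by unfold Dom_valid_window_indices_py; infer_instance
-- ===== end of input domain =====

-- B sorts the cuts once and binary-searches the first cut > t-k per window end t, instead of A's scan of all cuts per t.

-- ===== PORT A =====
def valid_window_indices_py (n_time : Int) (k : Int) (cuts : List Int) : List Int :=
  if cuts = [] then PySem.List.pyRange k n_time 1
  else
    (PySem.List.pyRange k n_time 1).foldl (fun idx t =>
      if cuts.any (fun c => decide (t - k < c) && decide (c < t)) then idx
      else idx ++ [t]) []

-- ===== PORT B =====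
-- hand port of Source B's first_greater binary-search loop (lo/hi as Nat; (lo+hi)//2 is Nat division)
def pvFirstGreater (s : List Int) (x : Int) (lo hi : Nat) : Nat :=
  if lo < hi then
    let mid := (lo + hi) / 2
    if s.getD mid 0 ≤ x then pvFirstGreater s x (mid + 1) hi
    else pvFirstGreater s x lo mid
  else lo
termination_by hi - lo
decreasing_by all_goals omega

def valid_window_indices_py_alt (n_time : Int) (k : Int) (cuts : List Int) : List Int :=
  if cuts = [] then PySem.List.pyRange k n_time 1
  else if n_time ≤ k then []
  else
  let s := PySem.List.sorted cuts (fun x => x) false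
  (PySem.List.pyRange k n_time 1).foldl (fun idx t =>
    let j := pvFirstGreater s (t - k) 0 s.length
    if j = s.length ∨ t ≤ s.getD j 0 then idx ++ [t] else idx) []

-- ===== PRECONDITION & SPEC =====
def Spec_valid_window_indices_py (n_time : Int) (k : Int) (cuts : List Int) (out : List Int) : Prop := out = valid_window_indices_py_alt n_time k cuts
instance (n_time : Int) (k : Int) (cuts : List Int) (out : List Int) : Decidable (Spec_valid_window_indices_py n_time k cuts out) := by unfold Spec_valid_window_indices_py; infer_instance

-- ===== CLAIM (what is proved, stated in full; the proofs are below) =====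
def Claim_equal_valid_window_indices_py : Prop := ∀ (n_time : Int) (k : Int) (cuts : List Int), Dom_valid_window_indices_py n_time k cuts → Spec_valid_window_indices_py n_time k cuts (valid_window_indices_py n_time k cuts)

-- ===== LEMMAS AND PROOFS =====

theorem pvSorted_getD_mono {s : List Int} (hs : s.Pairwise (· ≤ ·))
    {i j : Nat} (hij : i ≤ j) (hj : j < s.length) : s.getD i 0 ≤ s.getD j 0 := by
  rcases Nat.eq_or_lt_of_le hij with rfl | hlt
  · exact le_refl _
  · rw [List.getD_eq_getElem s 0 (Nat.lt_of_le_of_lt hij hj), List.getD_eq_getElem s 0 hj]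
    exact List.pairwise_iff_getElem.mp hs i j _ hj hlt

theorem pvFirstGreater_spec (s : List Int) (x : Int) (hs : s.Pairwise (· ≤ ·)) :
    (pvFirstGreater s x 0 s.length ≤ s.length ∧
     (∀ i, i < pvFirstGreater s x 0 s.length → s.getD i 0 ≤ x) ∧
     (∀ i, pvFirstGreater s x 0 s.length ≤ i → i < s.length → x < s.getD i 0)) := by
  have key : ∀ (n lo hi : Nat), hi - lo ≤ n → lo ≤ hi → hi ≤ s.length →
      (∀ i, i < lo → s.getD i 0 ≤ x) →
      (∀ i, hi ≤ i → i < s.length → x < s.getD i 0) →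
      (pvFirstGreater s x lo hi ≤ s.length ∧
       (∀ i, i < pvFirstGreater s x lo hi → s.getD i 0 ≤ x) ∧
       (∀ i, pvFirstGreater s x lo hi ≤ i → i < s.length → x < s.getD i 0)) := by
    intro n
    induction n with
    | zero =>
      intro lo hi hn hle hhi hlo hhi2
      rw [pvFirstGreater]
      have h : ¬ lo < hi := by omega
      simp only [if_neg h]
      exact ⟨by omega, fun i h1 => hlo i h1, fun i h1 h2 => hhi2 i (by omega) h2⟩
    | succ n ih =>
      intro lo hi hn hle hhi hlo hhi2
      rw [pvFirstGreater]
      by_cases h : lo < hi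
      · simp only [if_pos h]
        have hmid : (lo + hi) / 2 < hi := by omega
        have hmidlen : (lo + hi) / 2 < s.length := Nat.lt_of_lt_of_le hmid hhi
        by_cases hc : s.getD ((lo + hi) / 2) 0 ≤ x
        · simp only [if_pos hc]
          refine ih _ _ (by omega) (by omega) hhi ?_ hhi2
          intro i hi'
          by_cases hil : i < lo
          · exact hlo i hil
          · exact le_trans (pvSorted_getD_mono hs (by omega) hmidlen) hc
        · simp only [if_neg hc]
          refine ih _ _ (by omega) (by omega) (le_of_lt hmidlen) hlo ?_
          intro i hi' hilen
          exact lt_of_lt_of_le (lt_of_not_ge hc) (pvSorted_getD_mono hs hi' hilen)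
      · simp only [if_neg h]
        have : lo = hi := by omega
        exact ⟨by omega, fun i h1 => hlo i h1, fun i h1 h2 => hhi2 i (by omega) h2⟩
  exact key s.length 0 s.length (by omega) (Nat.zero_le _) (le_refl _)
    (fun i hi => absurd hi (Nat.not_lt_zero i))
    (fun i h1 h2 => absurd (Nat.lt_of_le_of_lt h1 h2) (lt_irrefl _))

-- per-t equivalence of the two keep-conditions
theorem pvCond_iff (cuts : List Int) (t k : Int) :
    (pvFirstGreater (PySem.List.sorted cuts (fun x => x) false) (t - k) 0
        (PySem.List.sorted cuts (fun x => x) false).length =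
        (PySem.List.sorted cuts (fun x => x) false).length ∨
     t ≤ (PySem.List.sorted cuts (fun x => x) false).getD
        (pvFirstGreater (PySem.List.sorted cuts (fun x => x) false) (t - k) 0
          (PySem.List.sorted cuts (fun x => x) false).length) 0) ↔
    ¬ ∃ c ∈ cuts, t - k < c ∧ c < t := by
  set s := PySem.List.sorted cuts (fun x => x) false with hsdef
  have hperm : s.Perm cuts := PySem.List.sorted_perm cuts (fun x => x) false
  have hs : s.Pairwise (· ≤ ·) := PySem.List.sorted_pairwise cuts (fun x => x)
  obtain ⟨hjlen, hbelow, habove⟩ :=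
    pvFirstGreater_spec s (t - k) hs
  set j := pvFirstGreater s (t - k) 0 s.length with hjdef
  constructor
  · rintro hor ⟨c, hc, h1, h2⟩
    have hcs : c ∈ s := hperm.mem_iff.mpr hc
    obtain ⟨i, hi, hci⟩ := List.getElem_of_mem hcs
    have hgi : s.getD i 0 = c := by rw [List.getD_eq_getElem s 0 hi, hci]
    have hij : j ≤ i := by
      by_contra hnot
      have := hbelow i (by omega)
      omega
    rcases hor with hj | hj
    · omega
    · have := pvSorted_getD_mono hs hij hi
      omega
  · intro hno
    by_cases hj : j = s.length
    · exact Or.inl hj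
    · right
      have hjl : j < s.length := lt_of_le_of_ne hjlen hj
      by_contra hlt
      exact hno ⟨s.getD j 0,
        hperm.mem_iff.mp (by rw [List.getD_eq_getElem s 0 hjl]; exact s.getElem_mem hjl),
        habove j (le_refl _) hjl, by omega⟩

-- ===== VERDICT (by name: the statement is the Claim_ definition above) =====
theorem valid_window_indices_py_spec : Claim_equal_valid_window_indices_py := by
  intro n_time k cuts _
  unfold Spec_valid_window_indices_py valid_window_indices_py valid_window_indices_py_alt
  have hfun : (fun (idx : List Int) (t : Int) =>
      let s := PySem.List.sorted cuts (fun x => x) false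
      let j := pvFirstGreater s (t - k) 0 s.length
      if j = s.length ∨ t ≤ s.getD j 0 then idx ++ [t] else idx) =
      (fun (idx : List Int) (t : Int) =>
      if cuts.any (fun c => decide (t - k < c) && decide (c < t)) then idx else idx ++ [t]) := by
    funext idx t
    show (if pvFirstGreater (PySem.List.sorted cuts (fun x => x) false) (t - k) 0
            (PySem.List.sorted cuts (fun x => x) false).length =
            (PySem.List.sorted cuts (fun x => x) false).length ∨
          t ≤ (PySem.List.sorted cuts (fun x => x) false).getD
            (pvFirstGreater (PySem.List.sorted cuts (fun x => x) false) (t - k) 0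
              (PySem.List.sorted cuts (fun x => x) false).length) 0
          then idx ++ [t] else idx) = _
    have h := pvCond_iff cuts t k
    have haux : (cuts.any (fun c => decide (t - k < c) && decide (c < t)) = true) ↔
        ∃ c ∈ cuts, t - k < c ∧ c < t := by
      simp
    by_cases hc : ∃ c ∈ cuts, t - k < c ∧ c < t
    · rw [if_neg (fun hb => h.mp hb hc), if_pos (haux.mpr hc)]
    · rw [if_pos (h.mpr hc), if_neg (fun hb => hc (haux.mp hb))]
  by_cases hnil : cuts = []
  · subst hnil
    simp
  · by_cases hle : n_time ≤ k
    · simp only [if_neg hnil, if_pos hle, PySem.List.pyRange_one_eq_nil hle, List.foldl_nil]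
    · simp only [if_neg hnil, if_neg hle, hfun]
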